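-- pv_equiv track=rewrite | github.com/Jerry25137/IP_Address_Toolkit | IP_packages/validator.py | validate_mask
-- ===== SOURCE A (Python) =====
-- def validate_mask(mask_bin, func):
--     o = mask_bin.count(1)
--     n = 0
--
--     for i in mask_bin:
--         if i == 1:
--             n += 1
--
--         elif i == 0:
--             break
--
--     if func == "eui64":
--         if o == 64:
--             return True
--
--         else:
--             return False
--
--     else:
--         if n == o:
--             return True
--
--         else:
--             return False
-- ===== SOURCE B (Python) =====
-- def validate_mask(mask_bin, func):
--     if func == "eui64":
--         return sum(1 for x in mask_bin if x == 1) == 64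
--     seen_zero = False
--     contiguous = True
--     for i in mask_bin:
--         if i == 0:
--             seen_zero = True
--         elif i == 1 and seen_zero:
--             contiguous = False
--     return contiguous
-- ===== Notes on version B (the rewrite author's own statement) =====
-- stated objective: alternative
-- what changed: Replaces A's leading-ones-count vs total-ones-count comparison by a one-pass state machine (seen_zero/contiguous flags) for the contiguity branch, and counts ones only on the eui64 path.
import Mathlib
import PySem

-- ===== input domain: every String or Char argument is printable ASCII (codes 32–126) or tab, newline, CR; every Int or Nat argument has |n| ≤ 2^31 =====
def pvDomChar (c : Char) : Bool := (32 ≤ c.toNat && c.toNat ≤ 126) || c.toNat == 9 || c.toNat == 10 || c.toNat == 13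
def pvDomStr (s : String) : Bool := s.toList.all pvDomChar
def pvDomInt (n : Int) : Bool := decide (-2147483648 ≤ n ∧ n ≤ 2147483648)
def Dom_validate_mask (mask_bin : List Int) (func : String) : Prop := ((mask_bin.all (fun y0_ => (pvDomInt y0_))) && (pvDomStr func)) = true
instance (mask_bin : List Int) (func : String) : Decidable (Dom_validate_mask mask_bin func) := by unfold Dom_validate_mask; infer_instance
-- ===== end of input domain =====

-- B replaces A's leading-ones vs total-ones count comparison by a one-pass seen_zero/contiguous state machine; same O(n) cost, alternative decomposition.


-- ===== PORT A =====
def aLoop : List Int → Int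
  | [] => 0
  | i :: rest =>
      if i = 1 then aLoop rest + 1
      else if i = 0 then 0
      else aLoop rest

def validate_mask (mask_bin : List Int) (func : String) : Bool :=
  let o : Int := PySem.List.count mask_bin 1
  let n : Int := aLoop mask_bin
  if func == "eui64" then
    if o == 64 then true else false
  else
    if n == o then true else false

-- ===== PORT B =====
def bScan : List Int → Bool → Bool → Bool
  | [], _, c => c
  | i :: rest, sz, c =>
      if i = 0 then bScan rest true c
      else if i = 1 && sz then bScan rest sz false
      else bScan rest sz c

def validate_mask_alt (mask_bin : List Int) (func : String) : Bool :=
  if func == "eui64" then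
    decide ((mask_bin.foldl (fun a x => if x = 1 then a + 1 else a) (0 : Int)) = 64)
  else bScan mask_bin false true

-- ===== PRECONDITION & SPEC =====
def Spec_validate_mask (mask_bin : List Int) (func : String) (out : Bool) : Prop := out = validate_mask_alt mask_bin func
instance (mask_bin : List Int) (func : String) (out : Bool) : Decidable (Spec_validate_mask mask_bin func out) := by unfold Spec_validate_mask; infer_instance

-- ===== CLAIM (what is proved, stated in full; the proofs are below) =====
def Claim_equal_validate_mask : Prop := ∀ (mask_bin : List Int) (func : String), Dom_validate_mask mask_bin func → Spec_validate_mask mask_bin func (validate_mask mask_bin func)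

-- ===== LEMMAS AND PROOFS =====

theorem count_eq_countP (l : List Int) :
    PySem.List.count l 1 = l.countP (fun x => decide (x = 1)) := by
  simp only [PySem.List.count_eq]; rfl

theorem count_zero_iff (l : List Int) :
    PySem.List.count l 1 = 0 ↔ l.any (fun x => decide (x = 1)) = false := by
  rw [count_eq_countP]
  simp [List.countP_eq_zero, List.any_eq_false]

theorem bScan_true (l : List Int) (c : Bool) :
    bScan l true c = (c && !(l.any (fun x => decide (x = 1)))) := by
  induction l generalizing c with
  | nil => simp [bScan]
  | cons i rest ih =>
      by_cases h2 : i = 1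
      · simp [bScan, h2, ih]
      · by_cases h1 : i = 0 <;> simp [bScan, h1, h2, ih]

theorem key (l : List Int) :
    (decide (aLoop l = PySem.List.count l 1)) = bScan l false true := by
  induction l with
  | nil => simp [aLoop, PySem.List.count_eq, bScan]
  | cons i rest ih =>
      by_cases h1 : i = 1
      · subst h1
        have e1 : aLoop (1 :: rest) = aLoop rest + 1 := by simp [aLoop]
        have e2 : bScan (1 :: rest) false true = bScan rest false true := by
          simp [bScan]
        have e3 : PySem.List.count (1 :: rest) 1 = PySem.List.count rest 1 + 1 := by
          simp [PySem.List.count_eq]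
        rw [e1, e2, e3]
        push_cast
        simpa using ih
      · by_cases h2 : i = 0
        · subst h2
          have e1 : aLoop (0 :: rest) = 0 := by simp [aLoop]
          have e2 : bScan (0 :: rest) false true = bScan rest true true := by
            simp [bScan]
          have e3 : PySem.List.count (0 :: rest) 1 = PySem.List.count rest 1 := by
            simp [PySem.List.count_eq]
          rw [e1, e2, e3, bScan_true, Bool.true_and]
          by_cases h5 : rest.any (fun x => decide (x = 1)) = false
          · have hc := (count_zero_iff rest).mpr h5
            have hc2 : List.count 1 rest = 0 := by
              simpa [PySem.List.count_eq] using hc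
            simp [h5, hc2]
          · rw [Bool.not_eq_false] at h5
            have h6 : PySem.List.count rest 1 ≠ 0 := by
              intro hh
              have := (count_zero_iff rest).mp hh
              simp [h5] at this
            simp only [h5, Bool.not_true, decide_eq_false_iff_not]
            exact fun hh => h6 (by exact_mod_cast hh.symm)
        · have e1 : aLoop (i :: rest) = aLoop rest := by simp [aLoop, h1, h2]
          have e2 : bScan (i :: rest) false true = bScan rest false true := by
            simp [bScan, h1, h2]
          have e3 : PySem.List.count (i :: rest) 1 = PySem.List.count rest 1 := by
            simp [PySem.List.count_eq, h1]
          rw [e1, e2, e3]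
          exact ih

-- ===== VERDICT (by name: the statement is the Claim_ definition above) =====
theorem validate_mask_spec : Claim_equal_validate_mask := by
  intro mask_bin func _
  unfold Spec_validate_mask validate_mask validate_mask_alt
  by_cases hf : func == "eui64"
  · simp only [hf, if_true]
    rw [PySem.List.foldl_ite_add_one, count_eq_countP]
    simp
  · simp only [hf, if_false, Bool.false_eq_true]
    rw [← key mask_bin]
    by_cases h : aLoop mask_bin = PySem.List.count mask_bin 1 <;> simp [h]
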